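-- pv_equiv track=rewrite | github.com/yakir1991/lora-lite-phy | scripts/reverse_engineering.py | interleave_bits
-- ===== SOURCE A (Python) =====
-- def interleave_bits(bits, sf_app, cw_len):
--     """Apply diagonal interleaving (matching C++ implementation)."""
--     # Create interleaver mapping like in C++ code
--     n_in = sf_app * cw_len
--     n_out = n_in
--     interleaved = [0] * n_out
--
--     rows = sf_app
--     cols = cw_len
--
--     for col in range(cols):
--         for row in range(rows):
--             dst = col * rows + row
--             rotated = (row - col) % rows
--             if rotated < 0:
--                 rotated += rows
--             src = rotated * cols + col
--
--             if dst < len(interleaved) and src < len(bits):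
--                 interleaved[dst] = bits[src]
--
--     return interleaved
-- ===== SOURCE B (Python) =====
-- def interleave_bits(bits, sf_app, cw_len):
--     """Matrix view: pad bits into an sf_app x cw_len row-major matrix, take each
--     column, rotate it down by its column index, and concatenate the rotated columns."""
--     n = sf_app * cw_len
--     if sf_app <= 0 or cw_len <= 0:
--         return [0] * n
--     padded = bits[:n] + [0] * (n - min(len(bits), n))
--     rows = [padded[r * cw_len:(r + 1) * cw_len] for r in range(sf_app)]
--     out = []
--     for col, column in enumerate(zip(*rows)):
--         k = (-col) % sf_app
--         out.extend(column[k:] + column[:k])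
--     return out
-- ===== Notes on version B (the rewrite author's own statement) =====
-- stated objective: alternative
-- what changed: Instead of computing a per-index modular scatter/gather mapping, B reshapes the (zero-padded) bit list into an sf_app x cw_len matrix, extracts its columns with zip, rotates each column down by its column index via list slicing, and concatenates the rotated columns.
import Mathlib
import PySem

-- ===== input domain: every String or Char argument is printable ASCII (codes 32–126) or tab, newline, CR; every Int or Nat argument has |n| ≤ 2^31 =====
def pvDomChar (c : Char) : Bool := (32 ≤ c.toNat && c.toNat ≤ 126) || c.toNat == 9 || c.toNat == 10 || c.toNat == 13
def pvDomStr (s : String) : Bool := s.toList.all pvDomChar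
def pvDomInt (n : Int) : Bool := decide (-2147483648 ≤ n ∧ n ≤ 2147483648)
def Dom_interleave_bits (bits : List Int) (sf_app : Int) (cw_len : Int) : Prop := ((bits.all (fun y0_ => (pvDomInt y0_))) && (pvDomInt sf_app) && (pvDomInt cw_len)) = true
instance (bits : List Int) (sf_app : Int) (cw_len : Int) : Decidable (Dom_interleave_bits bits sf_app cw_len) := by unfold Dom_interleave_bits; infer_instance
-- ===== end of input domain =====

-- B replaces A's per-index modular scatter loop by a matrix view: pad the bits into an
-- sf_app × cw_len matrix, rotate each column down by its column index using slices, and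
-- concatenate the rotated columns (objective: alternative; same cost).

-- ===== PORT A =====
def interleave_bits (bits : List Int) (sf_app : Int) (cw_len : Int) : List Int :=
  let n_in := sf_app * cw_len
  let n_out := n_in
  let interleaved := List.replicate n_out.toNat (0 : Int)
  let rows := sf_app
  let cols := cw_len
  (PySem.List.pyRange 0 cols 1).foldl (fun interleaved col =>
    (PySem.List.pyRange 0 rows 1).foldl (fun interleaved row =>
      let dst := col * rows + row
      let rotated := PySem.Int.mod (row - col) rows
      let rotated := if rotated < 0 then rotated + rows else rotated
      let src := rotated * cols + col
      if dst < (interleaved.length : Int) ∧ src < (bits.length : Int) then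
        PySem.List.pySetD interleaved dst (PySem.List.pyGetD bits src 0)
      else interleaved) interleaved) interleaved

-- ===== PORT B =====
def interleave_bits_alt (bits : List Int) (sf_app : Int) (cw_len : Int) : List Int :=
  let n := sf_app * cw_len
  if sf_app ≤ 0 ∨ cw_len ≤ 0 then
    List.replicate n.toNat (0 : Int)
  else
    let padded := PySem.List.slice bits none (some n) ++
      List.replicate (n - min (bits.length : Int) n).toNat (0 : Int)
    let rows := (PySem.List.pyRange 0 sf_app 1).map (fun r =>
      PySem.List.slice padded (some (r * cw_len)) (some ((r + 1) * cw_len)))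
    -- zip(*rows): exact here because every row is a full slice of length cw_len
    let cols := (PySem.List.pyRange 0 cw_len 1).map (fun j =>
      rows.map (fun row => PySem.List.pyGetD row j 0))
    (PySem.List.enumerate cols).foldl (fun out ci =>
      let k := PySem.Int.mod (-ci.1) sf_app
      out ++ (PySem.List.slice ci.2 (some k) none ++ PySem.List.slice ci.2 none (some k))) []

-- ===== PRECONDITION & SPEC =====
def Spec_interleave_bits (bits : List Int) (sf_app : Int) (cw_len : Int) (out : List Int) : Prop := out = interleave_bits_alt bits sf_app cw_len
instance (bits : List Int) (sf_app : Int) (cw_len : Int) (out : List Int) : Decidable (Spec_interleave_bits bits sf_app cw_len out) := by unfold Spec_interleave_bits; infer_instance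

-- ===== CLAIM (what is proved, stated in full; the proofs are below) =====
def Claim_equal_interleave_bits : Prop := ∀ (bits : List Int) (sf_app : Int) (cw_len : Int), Dom_interleave_bits bits sf_app cw_len → Spec_interleave_bits bits sf_app cw_len (interleave_bits bits sf_app cw_len)

-- ===== LEMMAS AND PROOFS =====

-- the bit A scatters to destination d (written with d's divmod decomposition)
def pvG (bits : List Int) (rows cols d : Int) : Int :=
  let col := PySem.Int.floordiv d rows
  let row := PySem.Int.mod d rows
  let src := PySem.Int.mod (row - col) rows * cols + col
  if src < (bits.length : Int) then PySem.List.pyGetD bits src 0 else 0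

-- A's inner-loop body for column c (zeta-reduced form of the port's lambda)
def pvBodyA (bits : List Int) (rows cols c : Int) : List Int → Int → List Int :=
  fun interleaved row =>
    if c * rows + row < (interleaved.length : Int) ∧
        (if PySem.Int.mod (row - c) rows < 0 then PySem.Int.mod (row - c) rows + rows
         else PySem.Int.mod (row - c) rows) * cols + c < (bits.length : Int) then
      PySem.List.pySetD interleaved (c * rows + row)
        (PySem.List.pyGetD bits
          ((if PySem.Int.mod (row - c) rows < 0 then PySem.Int.mod (row - c) rows + rows
            else PySem.Int.mod (row - c) rows) * cols + c) 0)
    else interleaved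

-- intermediate state of A's scatter loops: first m destinations final, rest still 0
def pvS (bits : List Int) (rows cols m : Int) : List Int :=
  (PySem.List.pyRange 0 m 1).map (pvG bits rows cols) ++ List.replicate (rows * cols - m).toNat (0 : Int)

-- B-side proof names for the pieces the port builds inline
def pvPad (bits : List Int) (n : Int) : List Int :=
  PySem.List.slice bits none (some n) ++ List.replicate (n - min (bits.length : Int) n).toNat (0 : Int)

def pvRow (bits : List Int) (a b r : Int) : List Int :=
  PySem.List.slice (pvPad bits (a * b)) (some (r * b)) (some ((r + 1) * b))

def pvColumn (bits : List Int) (a b c : Int) : List Int :=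
  ((PySem.List.pyRange 0 a 1).map (pvRow bits a b)).map (fun row => PySem.List.pyGetD row c 0)

def pvRot (a c : Int) (xs : List Int) : List Int :=
  PySem.List.slice xs (some (PySem.Int.mod (-c) a)) none ++
    PySem.List.slice xs none (some (PySem.Int.mod (-c) a))

theorem pv_divmod (rows c r : Int) (hr : 0 < rows) (hr0 : 0 ≤ r) (hrr : r < rows) :
    PySem.Int.floordiv (c * rows + r) rows = c ∧ PySem.Int.mod (c * rows + r) rows = r := by
  rw [PySem.Int.floordiv_eq_ediv_of_pos hr, PySem.Int.mod_eq_emod_of_pos hr]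
  constructor
  · rw [show c * rows + r = r + rows * c by ring,
      Int.add_mul_ediv_left r c (ne_of_gt hr), Int.ediv_eq_zero_of_lt hr0 hrr]
    ring
  · rw [show c * rows + r = r + rows * c by ring, Int.add_mul_emod_self_left,
      Int.emod_eq_of_lt hr0 hrr]

theorem pvS_length (bits : List Int) (rows cols m : Int) (h0 : 0 ≤ m) (hn : m ≤ rows * cols) :
    ((pvS bits rows cols m).length : Int) = rows * cols := by
  simp [pvS, PySem.List.length_pyRange_one]
  omega

-- one inner-loop step: writing destination m = c*rows+r finalises it
theorem pv_step (bits : List Int) (rows cols c r : Int) (hr : 0 < rows)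
    (hc0 : 0 ≤ c) (hc : c < cols) (hr0 : 0 ≤ r) (hrr : r < rows) :
    pvBodyA bits rows cols c (pvS bits rows cols (c * rows + r)) r
      = pvS bits rows cols (c * rows + r + 1) := by
  have hm0 : 0 ≤ c * rows + r := by positivity
  have hmn : c * rows + r < rows * cols := by nlinarith
  have hlen := pvS_length bits rows cols (c * rows + r) hm0 (le_of_lt hmn)
  have hnn : ¬ PySem.Int.mod (r - c) rows < 0 := not_lt.mpr (PySem.Int.mod_nonneg (r - c) hr)
  have hdm := pv_divmod rows c r hr hr0 hrr
  have hrep : (rows * cols - (c * rows + r)).toNat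
      = ((rows * cols - (c * rows + r + 1)).toNat) + 1 := by omega
  have hsucc : PySem.List.pyRange 0 (c * rows + r + 1) 1
      = PySem.List.pyRange 0 (c * rows + r) 1 ++ [c * rows + r] :=
    PySem.List.pyRange_one_succ_right hm0
  have hplen : ((PySem.List.pyRange 0 (c * rows + r) 1).map (pvG bits rows cols)).length
      = (c * rows + r).toNat := by
    simp [PySem.List.length_pyRange_one]
  have hgm : pvG bits rows cols (c * rows + r)
      = if PySem.Int.mod (r - c) rows * cols + c < (bits.length : Int) then
          PySem.List.pyGetD bits (PySem.Int.mod (r - c) rows * cols + c) 0 else 0 := by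
    simp only [pvG, hdm.1, hdm.2]
  unfold pvBodyA
  simp only [hnn, if_false, hlen]
  by_cases hsrc : PySem.Int.mod (r - c) rows * cols + c < (bits.length : Int)
  · rw [if_pos ⟨hmn, hsrc⟩, PySem.List.pySetD_of_nonneg _ _ hm0]
    unfold pvS
    rw [hsucc, hrep, List.map_append, List.replicate_succ,
      List.set_append_right _ _ (by omega), hplen]
    simp only [show (c * rows + r).toNat - (c * rows + r).toNat = 0 by omega, List.set_cons_zero]
    rw [List.append_assoc]
    simp [hgm, hsrc]
  · rw [if_neg (by tauto)]
    unfold pvS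
    rw [hsucc, hrep, List.map_append, List.replicate_succ, List.append_assoc]
    simp [hgm, hsrc]

-- A's inner loop over rows, for column c, starting at row r
theorem pv_inner (bits : List Int) (rows cols c : Int) (hr : 0 < rows) (hc0 : 0 ≤ c)
    (hc : c < cols) :
    ∀ (k : Nat) (r : Int), 0 ≤ r → r + k = rows →
    (PySem.List.pyRange r rows 1).foldl (pvBodyA bits rows cols c)
        (pvS bits rows cols (c * rows + r))
      = pvS bits rows cols (c * rows + rows) := by
  intro k
  induction k with
  | zero =>
    intro r hr0 hk
    rw [PySem.List.pyRange_one_eq_nil (by omega)]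
    simp only [List.foldl_nil]
    congr 1
    omega
  | succ k ih =>
    intro r hr0 hk
    rw [PySem.List.pyRange_one_cons (by omega : r < rows), List.foldl_cons,
      pv_step bits rows cols c r hr hc0 hc hr0 (by omega)]
    have := ih (r + 1) (by omega) (by omega)
    rw [show c * rows + r + 1 = c * rows + (r + 1) by ring]
    exact this

-- A's outer loop over columns, starting at column c
theorem pv_outer (bits : List Int) (rows cols : Int) (hr : 0 < rows) :
    ∀ (k : Nat) (c : Int), 0 ≤ c → c + k = cols →
    (PySem.List.pyRange c cols 1).foldl (fun interleaved col =>
        (PySem.List.pyRange 0 rows 1).foldl (pvBodyA bits rows cols col) interleaved)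
        (pvS bits rows cols (c * rows))
      = pvS bits rows cols (rows * cols) := by
  intro k
  induction k with
  | zero =>
    intro c hc0 hk
    rw [PySem.List.pyRange_one_eq_nil (show cols ≤ c by omega)]
    simp only [List.foldl_nil]
    congr 1
    have hcc : c = cols := by omega
    rw [hcc]; ring
  | succ k ih =>
    intro c hc0 hk
    rw [PySem.List.pyRange_one_cons (by omega : c < cols)]
    simp only [List.foldl_cons]
    have hinner := pv_inner bits rows cols c hr hc0 (by omega) rows.toNat 0 le_rfl (by omega)
    rw [show c * rows + 0 = c * rows by ring] at hinner
    rw [hinner]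
    have := ih (c + 1) (by omega) (by omega)
    rw [show (c + 1) * rows = c * rows + rows by ring] at this
    exact this

theorem pv_foldl_id {α β : Type} (l : List β) (x : α) :
    l.foldl (fun a _ => a) x = x := by
  induction l generalizing x with
  | nil => rfl
  | cons h t ih => simp [ih]

-- ---------- B-side lemmas ----------

theorem pv_pad_get (bits : List Int) (n i : Int) (h0 : 0 ≤ i) (hin : i < n) :
    PySem.List.pyGetD (pvPad bits n) i 0
      = if i < (bits.length : Int) then PySem.List.pyGetD bits i 0 else 0 := by
  rw [PySem.List.pyGetD_of_nonneg _ _ h0]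
  unfold pvPad
  rw [PySem.List.slice_to _ (by omega)]
  rw [List.getD_eq_getElem?_getD]
  by_cases hi : i.toNat < (bits.take n.toNat).length
  · have hmin : i.toNat < bits.length ∧ i.toNat < n.toNat := by
      simp only [List.length_take] at hi; omega
    rw [List.getElem?_append_left hi, List.getElem?_take_of_lt hmin.2,
      if_pos (by omega : i < (bits.length : Int)),
      PySem.List.pyGetD_of_nonneg _ _ h0, List.getD_eq_getElem?_getD]
  · have hib : ¬ i < (bits.length : Int) := by
      simp only [List.length_take] at hi; omega
    rw [List.getElem?_append_right (by omega), if_neg hib]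
    simp only [List.getElem?_replicate]
    split
    · rfl
    · rfl

theorem pv_row_get (bits : List Int) (a b r j : Int) (hb : 0 < b)
    (hr0 : 0 ≤ r) (hj0 : 0 ≤ j) (hjb : j < b) :
    PySem.List.pyGetD (pvRow bits a b r) j 0
      = PySem.List.pyGetD (pvPad bits (a * b)) (r * b + j) 0 := by
  have h2 : (0:Int) ≤ r * b := by positivity
  rw [PySem.List.pyGetD_of_nonneg _ _ hj0, PySem.List.pyGetD_of_nonneg _ _ (by omega : (0:Int) ≤ r * b + j)]
  rw [List.getD_eq_getElem?_getD, List.getD_eq_getElem?_getD]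
  unfold pvRow
  rw [PySem.List.slice_toNat _ (by positivity) (by positivity)]
  have h3 : (r + 1) * b = r * b + b := by ring
  have hjlt : j.toNat < ((r + 1) * b).toNat - (r * b).toNat := by rw [h3]; omega
  rw [List.getElem?_take_of_lt hjlt, List.getElem?_drop]
  congr 2
  omega

theorem pv_col_eq (bits : List Int) (a b c : Int) (ha : 0 < a) (hb : 0 < b)
    (hc0 : 0 ≤ c) (hcb : c < b) :
    pvColumn bits a b c
      = (PySem.List.pyRange 0 a 1).map
          (fun r => PySem.List.pyGetD (pvPad bits (a * b)) (r * b + c) 0) := by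
  unfold pvColumn
  rw [List.map_map]
  apply List.map_congr_left
  intro r hr
  rw [PySem.List.mem_pyRange_one] at hr
  exact pv_row_get bits a b r c hb hr.1 hc0 hcb

theorem pv_range_shift (m a : Int) (ha : 0 < a) :
    PySem.List.pyRange m (m + a) 1 = (PySem.List.pyRange 0 a 1).map (fun r => m + r) := by
  have h1 : PySem.List.pyRange m (m + a) 1
      = List.map (fun k : Nat => m + (k : Int)) (List.range a.toNat) := by
    rw [PySem.List.pyRange_of_pos _ _ (by omega : (0:Int) < 1)]
    rw [if_pos (by omega : m < m + a)]
    have he : (m + a - m + 1 - 1) = a := by ring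
    rw [he, Int.ediv_one]
    simp only [one_mul]
  have h2 : PySem.List.pyRange 0 a 1 = List.map (fun k : Nat => (k : Int)) (List.range a.toNat) := by
    have := PySem.List.pyRange_zero_natCast a.toNat
    rwa [Int.toNat_of_nonneg (le_of_lt ha)] at this
  rw [h1, h2, List.map_map]
  rfl

theorem pv_range_get (a : Int) (i : Nat) (h : i < a.toNat) :
    (PySem.List.pyRange 0 a 1)[i]'(by rw [PySem.List.length_pyRange_one]; omega) = (i : Int) := by
  have h2 : PySem.List.pyRange 0 a 1 = List.map (fun k : Nat => (k : Int)) (List.range a.toNat) := by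
    have := PySem.List.pyRange_zero_natCast a.toNat
    rwa [Int.toNat_of_nonneg (by omega)] at this
  simp [h2]

theorem pv_mod_shift (a c i : Int) (ha : 0 < a) (h0 : 0 ≤ i) (hia : i < a) :
    PySem.Int.mod (i - c) a
      = if i + PySem.Int.mod (-c) a < a then i + PySem.Int.mod (-c) a
        else i + PySem.Int.mod (-c) a - a := by
  have hk0 := PySem.Int.mod_nonneg (-c) ha
  have hka := PySem.Int.mod_lt (-c) ha
  rw [PySem.Int.mod_eq_emod_of_pos ha] at hk0 hka ⊢
  rw [PySem.Int.mod_eq_emod_of_pos ha]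
  have h1 : (i - c) % a = (i + (-c) % a) % a := by
    rw [sub_eq_add_neg, Int.add_emod, Int.emod_eq_of_lt h0 hia]
  rw [h1]
  by_cases hcase : i + (-c) % a < a
  · rw [if_pos hcase, Int.emod_eq_of_lt (by omega) hcase]
  · rw [if_neg hcase, ← Int.sub_emod_right (i + (-c) % a) a,
      Int.emod_eq_of_lt (by omega) (by omega)]

-- heart of the correspondence: rotating column c down by c places pvG's values in order
theorem pv_block (bits : List Int) (a b c : Int) (ha : 0 < a) (hb : 0 < b)
    (hc0 : 0 ≤ c) (hcb : c < b) :
    pvRot a c (pvColumn bits a b c)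
      = (PySem.List.pyRange 0 a 1).map (fun r => pvG bits a b (c * a + r)) := by
  have hk0 : 0 ≤ PySem.Int.mod (-c) a := PySem.Int.mod_nonneg _ ha
  have hka : PySem.Int.mod (-c) a < a := PySem.Int.mod_lt _ ha
  rw [pv_col_eq bits a b c ha hb hc0 hcb]
  unfold pvRot
  rw [PySem.List.slice_from _ hk0, PySem.List.slice_to _ hk0]
  set k := PySem.Int.mod (-c) a with hkdef
  have hcl : ((PySem.List.pyRange 0 a 1).map
      (fun r => PySem.List.pyGetD (pvPad bits (a * b)) (r * b + c) 0)).length = a.toNat := by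
    simp [PySem.List.length_pyRange_one]
  apply List.ext_getElem
  · simp only [List.length_append, List.length_drop, List.length_take, List.length_map,
      hcl, PySem.List.length_pyRange_one]
    omega
  · intro i hi1 hi2
    have hia : i < a.toNat := by
      simp only [List.length_map, PySem.List.length_pyRange_one] at hi2; omega
    have hrhs : ((PySem.List.pyRange 0 a 1).map (fun r => pvG bits a b (c * a + r)))[i]'hi2
        = pvG bits a b (c * a + (i : Int)) := by
      rw [List.getElem_map]
      exact congrArg (fun t => pvG bits a b (c * a + t)) (pv_range_get a i hia)
    rw [hrhs]
    have hcolget : ∀ (m : Nat) (hm : m < a.toNat),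
        ((PySem.List.pyRange 0 a 1).map
          (fun r => PySem.List.pyGetD (pvPad bits (a * b)) (r * b + c) 0))[m]'(by
            rw [hcl]; omega)
        = PySem.List.pyGetD (pvPad bits (a * b)) ((m : Int) * b + c) 0 := by
      intro m hm
      rw [List.getElem_map]
      exact congrArg (fun t => PySem.List.pyGetD (pvPad bits (a * b)) (t * b + c) 0)
        (pv_range_get a m hm)
    have hdm := pv_divmod a c (i : Int) ha (by omega) (by omega)
    have hsrc0 : 0 ≤ PySem.Int.mod ((i : Int) - c) a := PySem.Int.mod_nonneg _ ha
    have hsrca : PySem.Int.mod ((i : Int) - c) a < a := PySem.Int.mod_lt _ ha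
    have hsrcn : PySem.Int.mod ((i : Int) - c) a * b + c < a * b := by nlinarith
    have hG : pvG bits a b (c * a + (i : Int))
        = PySem.List.pyGetD (pvPad bits (a * b)) (PySem.Int.mod ((i : Int) - c) a * b + c) 0 := by
      rw [pv_pad_get bits (a * b) _ (add_nonneg (mul_nonneg hsrc0 hb.le) hc0) hsrcn]
      simp only [pvG, hdm.1, hdm.2]
    rw [hG, pv_mod_shift a c (i : Int) ha (by omega) (by omega)]
    rw [← hkdef]
    by_cases hcase : i < a.toNat - k.toNat
    · rw [List.getElem_append_left (by simp only [List.length_drop, hcl]; omega)]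
      rw [List.getElem_drop, hcolget (k.toNat + i) (by omega)]
      rw [if_pos (by omega : (i : Int) + k < a)]
      have hidx : ((k.toNat + i : Nat) : Int) = (i : Int) + k := by omega
      rw [hidx]
    · rw [List.getElem_append_right (by simp only [List.length_drop, hcl]; omega)]
      rw [List.getElem_take]
      simp only [List.length_drop, hcl]
      rw [hcolget (i - (a.toNat - k.toNat)) (by omega)]
      rw [if_neg (by omega : ¬ ((i : Int) + k < a))]
      have hidx : ((i - (a.toNat - k.toNat) : Nat) : Int) = (i : Int) + k - a := by omega
      rw [hidx]

-- ranges of destinations split into per-column blocks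
theorem pv_join (bits : List Int) (a b : Int) (ha : 0 < a) (hb : 0 < b) :
    ∀ (k : Nat) (c : Int), 0 ≤ c → c + k = b →
    (PySem.List.pyRange c b 1).flatMap
        (fun j => (PySem.List.pyRange 0 a 1).map (fun r => pvG bits a b (j * a + r)))
      = (PySem.List.pyRange (c * a) (a * b) 1).map (pvG bits a b) := by
  intro k
  induction k with
  | zero =>
    intro c hc0 hk
    have hcb : c = b := by omega
    subst hcb
    rw [show PySem.List.pyRange c c 1 = [] from PySem.List.pyRange_one_eq_nil le_rfl,
      show PySem.List.pyRange (c * a) (a * c) 1 = [] from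
        PySem.List.pyRange_one_eq_nil (mul_comm a c).le]
    simp
  | succ k ih =>
    intro c hc0 hk
    rw [PySem.List.pyRange_one_cons (by omega : c < b), List.flatMap_cons]
    have hsplit : PySem.List.pyRange (c * a) (a * b) 1
        = PySem.List.pyRange (c * a) (c * a + a) 1 ++ PySem.List.pyRange (c * a + a) (a * b) 1 :=
      PySem.List.pyRange_one_append _ _ _ (by nlinarith)
        (by nlinarith [mul_le_mul_of_nonneg_right (show c + 1 ≤ b by omega) (le_of_lt ha)])
    rw [hsplit, List.map_append]
    congr 1
    · rw [pv_range_shift (c * a) a ha, List.map_map]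
      rfl
    · have := ih (c + 1) (by omega) (by omega)
      rw [show (c + 1) * a = c * a + a by ring] at this
      exact this

-- ===== VERDICT (by name: the statement is the Claim_ definition above) =====
theorem interleave_bits_spec : Claim_equal_interleave_bits := by
  intro bits sf_app cw_len _
  unfold Spec_interleave_bits
  have hA : interleave_bits bits sf_app cw_len
      = (PySem.List.pyRange 0 cw_len 1).foldl (fun interleaved col =>
          (PySem.List.pyRange 0 sf_app 1).foldl (pvBodyA bits sf_app cw_len col) interleaved)
          (List.replicate (sf_app * cw_len).toNat (0 : Int)) := rfl
  by_cases hdeg : sf_app ≤ 0 ∨ cw_len ≤ 0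
  · have hB : interleave_bits_alt bits sf_app cw_len
        = List.replicate (sf_app * cw_len).toNat (0 : Int) := by
      unfold interleave_bits_alt
      simp only [if_pos hdeg]
    rw [hA, hB]
    rcases hdeg with h | h
    · simp only [PySem.List.pyRange_one_eq_nil (show sf_app ≤ (0 : Int) from h), List.foldl_nil]
      exact pv_foldl_id _ _
    · rw [PySem.List.pyRange_one_eq_nil (show cw_len ≤ (0 : Int) from h), List.foldl_nil]
  · have ha : 0 < sf_app := by omega
    have hb : 0 < cw_len := by omega
    -- A's side: the scatter loops fill every destination with pvG
    have hinit : List.replicate (sf_app * cw_len).toNat (0 : Int)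
        = pvS bits sf_app cw_len 0 := by
      unfold pvS
      rw [PySem.List.pyRange_one_eq_nil le_rfl]
      simp
    have houter := pv_outer bits sf_app cw_len ha cw_len.toNat 0 le_rfl (by omega)
    rw [show (0 : Int) * sf_app = 0 by ring] at houter
    have hAfin : interleave_bits bits sf_app cw_len
        = (PySem.List.pyRange 0 (sf_app * cw_len) 1).map (pvG bits sf_app cw_len) := by
      rw [hA, hinit, houter]
      unfold pvS
      rw [show sf_app * cw_len - sf_app * cw_len = 0 by ring]
      simp
    -- B's side: the rotated columns, flattened
    have hBdef : interleave_bits_alt bits sf_app cw_len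
        = (PySem.List.enumerate
            ((PySem.List.pyRange 0 cw_len 1).map (pvColumn bits sf_app cw_len))).foldl
            (fun out ci => out ++ pvRot sf_app ci.1 ci.2) [] := by
      simp only [interleave_bits_alt]
      rw [if_neg hdeg]
      rfl
    have hcollen : ((PySem.List.pyRange 0 cw_len 1).map (pvColumn bits sf_app cw_len)).length
        = cw_len.toNat := by
      simp [PySem.List.length_pyRange_one]
    have hBfin : interleave_bits_alt bits sf_app cw_len
        = (PySem.List.pyRange 0 cw_len 1).flatMap
            (fun c => pvRot sf_app c (pvColumn bits sf_app cw_len c)) := by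
      rw [hBdef,
        PySem.List.foldl_append_eq_flatMap (fun ci : Int × List Int => pvRot sf_app ci.1 ci.2)]
      rw [PySem.List.enumerate_eq_map_pyRange _ ([] : List Int)]
      simp only [List.flatMap_map]
      simp only [PySem.List.len, hcollen]
      rw [show ((cw_len.toNat : Int)) = cw_len from Int.toNat_of_nonneg (by omega)]
      rw [List.nil_append]
      apply List.flatMap_congr
      intro j hj
      rw [PySem.List.mem_pyRange_one] at hj
      have hget : PySem.List.pyGetD
          ((PySem.List.pyRange 0 cw_len 1).map (pvColumn bits sf_app cw_len)) j ([] : List Int)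
          = pvColumn bits sf_app cw_len j := by
        rw [PySem.List.pyGetD_eq_getElem _ _ hj.1
          (by simp only [List.length_map, PySem.List.length_pyRange_one]; omega)]
        rw [List.getElem_map]
        congr 1
        exact (pv_range_get cw_len j.toNat (by omega)).trans (Int.toNat_of_nonneg hj.1)
      simp only [hget]
    rw [hAfin, hBfin]
    have hcongr : (PySem.List.pyRange 0 cw_len 1).flatMap
          (fun c => pvRot sf_app c (pvColumn bits sf_app cw_len c))
        = (PySem.List.pyRange 0 cw_len 1).flatMap
          (fun c => (PySem.List.pyRange 0 sf_app 1).map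
            (fun r => pvG bits sf_app cw_len (c * sf_app + r))) := by
      apply List.flatMap_congr
      intro c hc
      rw [PySem.List.mem_pyRange_one] at hc
      exact pv_block bits sf_app cw_len c ha hb hc.1 hc.2
    rw [hcongr]
    have hjoin := pv_join bits sf_app cw_len ha hb cw_len.toNat 0 le_rfl (by omega)
    rw [show (0 : Int) * sf_app = 0 by ring] at hjoin
    rw [hjoin]
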